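-- pv_equiv track=rewrite | github.com/MatthieuSCORDIA/chatbot | Partie_de_matthieu.py | clean_rep
-- ===== SOURCE A (Python) =====
-- def clean_rep(reponse):
--     for caractere_clean in range(len(reponse)):
--         if 64 < ord(reponse[caractere_clean]) < 91:
--             reponse = reponse[:caractere_clean] + chr(ord(reponse[caractere_clean]) + 32) + reponse[
--                                                                                             caractere_clean + 1:]
--         elif not (96 < ord(reponse[caractere_clean]) < 123):
--             reponse = reponse[:caractere_clean] + " " + reponse[caractere_clean + 1:]
--
--     caractere_clean = 0
--     while caractere_clean < len(reponse) - 1: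
--         if reponse[caractere_clean] == reponse[caractere_clean + 1] and reponse[caractere_clean] == " ":
--             reponse = reponse[:caractere_clean] + reponse[caractere_clean + 1:]
--         else:
--             caractere_clean += 1
--     return reponse
-- ===== SOURCE B (Python) =====
-- def clean_rep(reponse):
--     out = []
--     for c in reponse:
--         o = ord(c)
--         if 64 < o < 91:
--             out.append(chr(o + 32))
--         elif 96 < o < 123:
--             out.append(c)
--         elif not out or out[-1] != ' ':
--             out.append(' ')
--     return ''.join(out)
-- ===== Notes on version B (the rewrite author's own statement) =====
-- stated objective: faster
-- what changed: A rewrites the string in place with repeated slice-and-concatenate passes (one per index, then a while loop that deletes duplicate spaces one at a time); B is a single left-to-right pass that appends to an accumulator, lowercasing letters and emitting at most one space per run of non-letters.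
import Mathlib
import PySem

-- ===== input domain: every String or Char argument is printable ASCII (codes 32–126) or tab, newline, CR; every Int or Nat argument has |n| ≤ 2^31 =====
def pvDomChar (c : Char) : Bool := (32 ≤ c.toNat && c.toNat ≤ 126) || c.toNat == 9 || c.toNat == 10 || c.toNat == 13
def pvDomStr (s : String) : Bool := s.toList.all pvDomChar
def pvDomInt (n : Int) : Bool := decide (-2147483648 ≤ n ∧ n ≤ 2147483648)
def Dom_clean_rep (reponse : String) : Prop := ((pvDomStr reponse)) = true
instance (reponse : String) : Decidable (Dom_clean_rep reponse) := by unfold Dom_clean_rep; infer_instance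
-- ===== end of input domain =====

-- B replaces A's two index-splicing rewrite loops (quadratic string slicing) by a single
-- left-to-right pass with an accumulator that lowercases letters and emits at most one space per
-- run of non-letters; same return value, B measured faster.

-- ===== PORT A =====
-- one step of A's first for-loop: rewrite position i of the evolving string
def stepA (s : List Char) (i : Nat) : List Char :=
  let c := (PySem.List.pyGet? s (i : Int)).getD ' '
  if 64 < c.toNat ∧ c.toNat < 91 then
    PySem.List.slice s none (some (i : Int)) ++ [Char.ofNat (c.toNat + 32)]
      ++ PySem.List.slice s (some ((i + 1 : Nat) : Int)) none
  else if ¬ (96 < c.toNat ∧ c.toNat < 123) then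
    PySem.List.slice s none (some (i : Int)) ++ [' ']
      ++ PySem.List.slice s (some ((i + 1 : Nat) : Int)) none
  else s

-- A's second (while) loop: delete a space that is followed by another space, else advance
def collapseA (s : List Char) (i : Nat) : List Char :=
  if h : i < s.length - 1 then
    if hc : (PySem.List.pyGet? s (i : Int)).getD ' ' = (PySem.List.pyGet? s ((i + 1 : Nat) : Int)).getD ' '
        ∧ (PySem.List.pyGet? s (i : Int)).getD ' ' = ' ' then
      collapseA (PySem.List.slice s none (some (i : Int))
        ++ PySem.List.slice s (some ((i + 1 : Nat) : Int)) none) i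
    else
      collapseA s (i + 1)
  else s
termination_by s.length - i
decreasing_by
  · simp only [PySem.List.slice_to_natCast, PySem.List.slice_from_natCast,
      List.length_append, List.length_take, List.length_drop]
    omega
  · omega

def clean_rep (reponse : String) : String :=
  String.mk (collapseA ((List.range reponse.toList.length).foldl stepA reponse.toList) 0)

-- ===== PORT B =====
def stepB (out : List Char) (c : Char) : List Char :=
  let o := c.toNat
  if 64 < o ∧ o < 91 then out ++ [Char.ofNat (o + 32)]
  else if 96 < o ∧ o < 123 then out ++ [c]
  else if out = [] ∨ out.getLast? ≠ some ' ' then out ++ [' ']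
  else out

def clean_rep_alt (reponse : String) : String :=
  String.mk (reponse.toList.foldl stepB [])

-- ===== PRECONDITION & SPEC =====
def Spec_clean_rep (reponse : String) (out : String) : Prop := out = clean_rep_alt reponse
instance (reponse : String) (out : String) : Decidable (Spec_clean_rep reponse out) := by unfold Spec_clean_rep; infer_instance

-- ===== CLAIM (what is proved, stated in full; the proofs are below) =====
def Claim_equal_clean_rep : Prop := ∀ (reponse : String), Dom_clean_rep reponse → Spec_clean_rep reponse (clean_rep reponse)

-- ===== LEMMAS AND PROOFS =====

-- the per-character map computed by A's first loop
def fchar (c : Char) : Char :=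
  if 64 < c.toNat ∧ c.toNat < 91 then Char.ofNat (c.toNat + 32)
  else if 96 < c.toNat ∧ c.toNat < 123 then c
  else ' '

-- collapse of adjacent double spaces, recursing from the front (keeps the last of a run)
def sqR : List Char → List Char
  | [] => []
  | [c] => [c]
  | c :: d :: rest => if c = ' ' ∧ d = ' ' then sqR (d :: rest) else c :: sqR (d :: rest)

-- collapse driven by a "previous emitted char was a space" flag (keeps the first of a run)
def sqF (b : Bool) : List Char → List Char
  | [] => []
  | c :: rest => if b ∧ c = ' ' then sqF b rest else c :: sqF (c == ' ') rest

theorem sqR_eq_sqF (t : List Char) (c : Char) : sqR (c :: t) = c :: sqF (c == ' ') t := by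
  induction t generalizing c with
  | nil => simp [sqR, sqF]
  | cons d rest ih =>
    by_cases h : c = ' ' ∧ d = ' '
    · obtain ⟨rfl, rfl⟩ := h
      simp [sqR, sqF, ih ' ']
    · have : ¬ ((c == ' ') = true ∧ d = ' ') := by
        intro ⟨h1, h2⟩; exact h ⟨by simpa using h1, h2⟩
      simp only [sqR, sqF, if_neg h, if_neg this, ih d]

theorem sqF_false_eq_sqR (t : List Char) : sqF false t = sqR t := by
  cases t with
  | nil => simp [sqF, sqR]
  | cons c rest => rw [sqR_eq_sqF]; simp [sqF]

theorem foldl_stepA_eq (s : List Char) (k : Nat) (hk : k ≤ s.length) :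
    (List.range k).foldl stepA s = (s.take k).map fchar ++ s.drop k := by
  induction k with
  | zero => simp
  | succ k ih =>
    have hk' : k ≤ s.length := by omega
    have hkl : k < s.length := by omega
    rw [List.range_succ, List.foldl_append, ih hk']
    set t := (s.take k).map fchar ++ s.drop k with ht
    have hlen : ((s.take k).map fchar).length = k := by
      simp [List.length_take]; omega
    have hget : t[k]? = some s[k] := by
      rw [ht, List.getElem?_append_right (by omega)]
      rw [hlen]
      simp [List.getElem?_drop]
    have htake : t.take k = (s.take k).map fchar := by
      rw [ht, List.take_append_of_le_length hlen.ge]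
      exact List.take_of_length_le hlen.le
    have hdrop : t.drop (k + 1) = s.drop (k + 1) := by
      rw [ht, List.drop_append, hlen]
      have h1 : (List.map fchar (s.take k)).drop (k + 1) = [] := by
        apply List.drop_eq_nil_of_le
        omega
      rw [h1, List.nil_append, List.drop_drop]
      congr 1
      omega
    have hc : (PySem.List.pyGet? t (k : Int)).getD ' ' = s[k] := by
      rw [PySem.List.pyGet?_natCast, hget]
      rfl
    simp only [List.foldl_cons, List.foldl_nil, stepA, hc,
      PySem.List.slice_to_natCast, PySem.List.slice_from_natCast, htake, hdrop,
      List.map_take]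
    have hm : k < (List.map fchar s).length := by simpa using hkl
    have hstep : List.take (k + 1) (List.map fchar s)
        = List.take k (List.map fchar s) ++ [fchar s[k]] := by
      rw [List.take_succ]
      simp [List.getElem?_eq_getElem hm]
    rw [hstep, List.append_assoc]
    by_cases h1 : 64 < s[k].toNat ∧ s[k].toNat < 91
    · simp [h1, fchar]
    · by_cases h2 : 96 < s[k].toNat ∧ s[k].toNat < 123
      · simp only [if_neg h1, if_neg (not_not_intro h2)]
        rw [ht, List.map_take, List.drop_eq_getElem_cons hkl]
        simp [fchar, h1, h2]
      · simp [h1, h2, fchar]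

theorem pyGetD_at (s : List Char) (j : Nat) (hj : j < s.length) :
    (PySem.List.pyGet? s ((j : Nat) : Int)).getD ' ' = s[j] := by
  rw [PySem.List.pyGet?_natCast, List.getElem?_eq_getElem hj]
  rfl

theorem collapseA_eq (s : List Char) (i : Nat) :
    collapseA s i = s.take i ++ sqR (s.drop i) := by
  induction s, i using collapseA.induct with
  | case1 s i h hc ih =>
    have hi1 : i + 1 < s.length := by omega
    have hi : i < s.length := by omega
    rw [pyGetD_at s i hi, pyGetD_at s (i + 1) hi1] at hc
    rw [collapseA, dif_pos h]
    rw [dif_pos (by rw [pyGetD_at s i hi, pyGetD_at s (i + 1) hi1]; exact hc), ih]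
    simp only [PySem.List.slice_to_natCast, PySem.List.slice_from_natCast]
    have hta : (s.take i).length = i := by simp; omega
    rw [List.take_append_of_le_length hta.ge, List.take_of_length_le hta.le,
      List.drop_append, hta, Nat.sub_self, List.drop_zero,
      List.drop_eq_nil_of_le hta.le, List.nil_append]
    congr 1
    have h1 : s[i] = ' ' := hc.2
    have h2 : s[i+1] = ' ' := hc.1.symm.trans hc.2
    rw [List.drop_eq_getElem_cons hi, List.drop_eq_getElem_cons hi1]
    simp [sqR, h1, h2]
  | case2 s i h hc ih =>
    have hi1 : i + 1 < s.length := by omega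
    have hi : i < s.length := by omega
    rw [pyGetD_at s i hi, pyGetD_at s (i + 1) hi1] at hc
    rw [collapseA, dif_pos h]
    rw [dif_neg (by rw [pyGetD_at s i hi, pyGetD_at s (i + 1) hi1]; exact hc), ih]
    have hcond : ¬ (s[i] = ' ' ∧ s[i+1] = ' ') := by
      intro ⟨a, b⟩
      exact hc ⟨a.trans b.symm, a⟩
    have hd1 : s.drop (i + 1) = s[i+1] :: s.drop (i + 1 + 1) := List.drop_eq_getElem_cons hi1
    rw [List.drop_eq_getElem_cons hi, hd1]
    have hsq : sqR (s[i] :: s[i+1] :: s.drop (i + 1 + 1))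
        = s[i] :: sqR (s[i+1] :: s.drop (i + 1 + 1)) := by
      simp [sqR, hcond]
    rw [hsq, ← hd1]
    have hts : s.take (i + 1) = s.take i ++ [s[i]] := by
      rw [List.take_succ]; simp [List.getElem?_eq_getElem hi]
    rw [hts, List.append_assoc]
    rfl
  | case3 s i h =>
    rw [collapseA, dif_neg h]
    rcases hd : s.drop i with _ | ⟨c, rest⟩
    · have hle : s.length ≤ i := by
        by_contra hlt
        have := congrArg List.length hd
        simp at this; omega
      simp [sqR, List.take_of_length_le hle]
    · have hrest : rest = [] := by
        have := congrArg List.length hd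
        simp at this
        cases rest with
        | nil => rfl
        | cons _ _ => simp at this; omega
      subst hrest
      conv_lhs => rw [← List.take_append_drop i s, hd]
      simp [sqR]

theorem sqF_cons (b : Bool) (c : Char) (t : List Char) :
    sqF b (c :: t) = if b ∧ c = ' ' then sqF b t else c :: sqF (c == ' ') t := rfl

theorem foldl_stepB_eq (s : List Char) (out : List Char) :
    s.foldl stepB out = out ++ sqF (out.getLast? == some ' ') (s.map fchar) := by
  induction s generalizing out with
  | nil => simp [sqF]
  | cons c rest ih =>
    rw [List.foldl_cons, ih, List.map_cons, sqF_cons]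
    by_cases h1 : 64 < c.toNat ∧ c.toNat < 91
    · have hv : (Char.ofNat (c.toNat + 32)).toNat = c.toNat + 32 := by
        have hvc : Nat.isValidChar (c.toNat + 32) := Or.inl (by omega)
        simp [Char.ofNat, hvc, Char.ofNatAux]
        omega
      have hne' : ¬ (Char.ofNat (c.toNat + 32) = ' ') := by
        intro he
        have h32 : (' ' : Char).toNat = 32 := rfl
        have := congrArg Char.toNat he
        rw [hv, h32] at this
        omega
      have hf : fchar c = Char.ofNat (c.toNat + 32) := by rw [fchar, if_pos h1]
      have hb1 : ((some (Char.ofNat (c.toNat + 32)) : Option Char) == some ' ') = false := by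
        simp [hne']
      have hb2 : (Char.ofNat (c.toNat + 32) == ' ') = false := by simp [hne']
      simp only [stepB, if_pos h1, hf, List.getLast?_concat, hb1, hb2,
        if_neg (show ¬ ((out.getLast? == some ' ') = true ∧ Char.ofNat (c.toNat + 32) = ' ')
          from fun hh => hne' hh.2)]
      simp [List.append_assoc]
    · by_cases h2 : 96 < c.toNat ∧ c.toNat < 123
      · have hne' : ¬ (c = ' ') := by
          intro he; subst he
          have h32 : (' ' : Char).toNat = 32 := rfl
          rw [h32] at h2
          omega
        have hf : fchar c = c := by rw [fchar, if_neg h1, if_pos h2]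
        have hb1 : ((some c : Option Char) == some ' ') = false := by simp [hne']
        have hb2 : (c == ' ') = false := by simp [hne']
        simp only [stepB, if_neg h1, if_pos h2, hf, List.getLast?_concat, hb1, hb2,
          if_neg (show ¬ ((out.getLast? == some ' ') = true ∧ c = ' ')
            from fun hh => hne' hh.2)]
        simp [List.append_assoc]
      · have hf : fchar c = ' ' := by rw [fchar, if_neg h1, if_neg h2]
        by_cases hb : out.getLast? = some ' '
        · have hcond : ¬ (out = [] ∨ out.getLast? ≠ some ' ') := by
            rintro (he | hne)
            · subst he; simp at hb
            · exact hne hb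
          rw [hf, if_pos ⟨by simp [hb], rfl⟩]
          simp only [stepB, if_neg h1, if_neg h2, if_neg hcond]
        · have hcond : out = [] ∨ out.getLast? ≠ some ' ' := Or.inr hb
          rw [hf, if_neg (show ¬ ((out.getLast? == some ' ') = true ∧ (' ' : Char) = ' ')
            from fun hh => hb (by simpa using hh.1))]
          simp only [stepB, if_neg h1, if_neg h2, if_pos hcond, List.getLast?_concat]
          have : ((some ' ' : Option Char) == some ' ') = true := by simp
          rw [this]
          have : ((' ' : Char) == ' ') = true := by simp
          rw [this]
          simp [List.append_assoc]

-- ===== VERDICT (by name: the statement is the Claim_ definition above) =====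
theorem clean_rep_spec : Claim_equal_clean_rep := by
  intro reponse _
  unfold Spec_clean_rep clean_rep clean_rep_alt
  rw [foldl_stepA_eq _ _ (le_refl _), foldl_stepB_eq, collapseA_eq]
  simp [sqF_false_eq_sqR, List.take_of_length_le, List.drop_eq_nil_of_le]
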